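-- pv_equiv track=rewrite | github.com/MahjongRepository/mahjong | mahjong/utils.py | classify_hand_suits
-- ===== SOURCE A (Python) =====
-- from collections.abc import Callable, Collection, Sequence
--
-- def classify_hand_suits(hand: Collection[Sequence[int]]) -> tuple[int, int]:
--     """
--     Classify the tile sets in a hand by suit, returning a bitmask and honor count.
--
--     The bitmask bits are: ``1`` for sou, ``2`` for pin, ``4`` for man.
--
--     >>> from mahjong.utils import classify_hand_suits
--     >>> classify_hand_suits([[0, 1, 2], [27, 27, 27]])
--     (4, 1)
--
--     :param hand: collection of tile sets, each a sequence of tile indices in 34-format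
--     :return: tuple of (suit_mask, honor_count)
--     """
--     suit_mask = 0
--     honor_count = 0
--     for item in hand:
--         first = item[0]
--         if first >= 27:
--             honor_count += 1
--         elif first >= 18:
--             suit_mask |= 1
--         elif first >= 9:
--             suit_mask |= 2
--         else:
--             suit_mask |= 4
--     return suit_mask, honor_count
-- ===== SOURCE B (Python) =====
-- def classify_hand_suits(hand):
--     firsts = [item[0] for item in hand]
--     man = any(f < 9 for f in firsts)
--     pin = any(9 <= f < 18 for f in firsts)
--     sou = any(18 <= f < 27 for f in firsts)
--     honor_count = sum(f >= 27 for f in firsts)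
--     return 4 * man + 2 * pin + sou, honor_count
-- ===== Notes on version B (the rewrite author's own statement) =====
-- stated objective: idiomatic
-- what changed: Replaces the stateful loop with an |=-cascade by four declarative passes: three any() suit-presence tests combined arithmetically into the bitmask, and a sum() of the honor predicate.
import Mathlib
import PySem

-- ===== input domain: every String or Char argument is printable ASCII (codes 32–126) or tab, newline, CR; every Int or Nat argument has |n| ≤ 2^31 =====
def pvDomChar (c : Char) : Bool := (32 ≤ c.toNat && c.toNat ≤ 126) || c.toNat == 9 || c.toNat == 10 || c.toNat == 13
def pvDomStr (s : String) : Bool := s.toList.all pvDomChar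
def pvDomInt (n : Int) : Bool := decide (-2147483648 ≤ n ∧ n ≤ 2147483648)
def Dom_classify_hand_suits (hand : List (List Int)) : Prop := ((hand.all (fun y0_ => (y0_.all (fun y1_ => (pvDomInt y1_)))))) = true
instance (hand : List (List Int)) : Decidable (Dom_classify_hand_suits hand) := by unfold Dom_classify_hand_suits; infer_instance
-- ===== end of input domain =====

-- B replaces A's stateful |=-cascade loop by four declarative passes (idiomatic; same O(n) cost);
-- equivalence is about the return value; Pre_ excludes hands containing an empty tile set, where Python A (and B) raise IndexError.

-- ===== PORT A =====
-- the loop body of A, one step per tile set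
def aStep (st : Int × Int) (item : List Int) : Int × Int :=
  let first := (PySem.List.pyGet? item 0).getD 0
  if first ≥ 27 then (st.1, st.2 + 1)
  else if first ≥ 18 then (Int.lor st.1 1, st.2)
  else if first ≥ 9 then (Int.lor st.1 2, st.2)
  else (Int.lor st.1 4, st.2)

def classify_hand_suits (hand : List (List Int)) : Int × Int :=
  hand.foldl aStep (0, 0)

-- ===== PORT B =====
-- Python bool used as int (4 * man etc.)
def boolToInt (b : Bool) : Int := if b then 1 else 0

def classify_hand_suits_alt (hand : List (List Int)) : Int × Int :=
  let firsts := hand.map (fun item => (PySem.List.pyGet? item 0).getD 0)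
  let man := firsts.any (fun f => decide (f < 9))
  let pin := firsts.any (fun f => decide (9 ≤ f) && decide (f < 18))
  let sou := firsts.any (fun f => decide (18 ≤ f) && decide (f < 27))
  let honor_count : Int := ((firsts.filter (fun f => decide (27 ≤ f))).length : Int)
  (4 * boolToInt man + 2 * boolToInt pin + boolToInt sou, honor_count)

-- ===== PRECONDITION & SPEC =====
-- Pre_ excludes hands containing an empty tile set: Python's item[0] raises IndexError there.
def Pre_classify_hand_suits (hand : List (List Int)) : Prop := ∀ item ∈ hand, item ≠ []
instance (hand : List (List Int)) : Decidable (Pre_classify_hand_suits hand) := by unfold Pre_classify_hand_suits; infer_instance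

def pvWitness_classify_hand_suits : List (List Int) := [[0, 1, 2], [27, 27, 27]]

def Spec_classify_hand_suits (hand : List (List Int)) (out : Int × Int) : Prop := out = classify_hand_suits_alt hand
instance (hand : List (List Int)) (out : Int × Int) : Decidable (Spec_classify_hand_suits hand out) := by unfold Spec_classify_hand_suits; infer_instance

-- ===== CLAIM (what is proved, stated in full; the proofs are below) =====
def Claim_equal_classify_hand_suits : Prop := ∀ (hand : List (List Int)), Dom_classify_hand_suits hand → Pre_classify_hand_suits hand → Spec_classify_hand_suits hand (classify_hand_suits hand)

-- ===== LEMMAS AND PROOFS =====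

-- the first element of a tile set, as both ports read it
def pvFirst (item : List Int) : Int := (PySem.List.pyGet? item 0).getD 0

theorem alt_fst (hand : List (List Int)) :
    (classify_hand_suits_alt hand).1
      = 4 * boolToInt ((hand.map pvFirst).any (fun f => decide (f < 9)))
        + 2 * boolToInt ((hand.map pvFirst).any (fun f => decide (9 ≤ f) && decide (f < 18)))
        + boolToInt ((hand.map pvFirst).any (fun f => decide (18 ≤ f) && decide (f < 27))) := rfl

theorem alt_snd (hand : List (List Int)) :
    (classify_hand_suits_alt hand).2
      = (((hand.map pvFirst).filter (fun f => decide (27 ≤ f))).length : Int) := rfl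

theorem lor_small (m x : Int) (b : Int) (hm0 : 0 ≤ m) (hm7 : m ≤ 7) (hx0 : 0 ≤ x) (hx7 : x ≤ 7)
    (hb : b = 1 ∨ b = 2 ∨ b = 4) :
    (Int.lor m b).lor x = Int.lor m (Int.lor b x) := by
  rcases hb with rfl | rfl | rfl <;> interval_cases m <;> interval_cases x <;> decide

theorem lor_bounds (m b : Int) (hm0 : 0 ≤ m) (hm7 : m ≤ 7) (hb : b = 1 ∨ b = 2 ∨ b = 4) :
    0 ≤ Int.lor m b ∧ Int.lor m b ≤ 7 := by
  rcases hb with rfl | rfl | rfl <;> interval_cases m <;> decide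

theorem alt_fst_bounds (hand : List (List Int)) :
    0 ≤ (classify_hand_suits_alt hand).1 ∧ (classify_hand_suits_alt hand).1 ≤ 7 := by
  rw [alt_fst]
  rcases (hand.map pvFirst).any (fun f => decide (f < 9)) with _ | _ <;>
  rcases (hand.map pvFirst).any (fun f => decide (9 ≤ f) && decide (f < 18)) with _ | _ <;>
  rcases (hand.map pvFirst).any (fun f => decide (18 ≤ f) && decide (f < 27)) with _ | _ <;>
    simp [boolToInt]

-- ORing a single suit bit into a three-bit mask, in B's arithmetic form
theorem lor4_eq (a b c : Bool) :
    Int.lor 4 (4 * boolToInt a + 2 * boolToInt b + boolToInt c)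
      = 4 + 2 * boolToInt b + boolToInt c := by
  cases a <;> cases b <;> cases c <;> decide

theorem lor2_eq (a b c : Bool) :
    Int.lor 2 (4 * boolToInt a + 2 * boolToInt b + boolToInt c)
      = 4 * boolToInt a + 2 + boolToInt c := by
  cases a <;> cases b <;> cases c <;> decide

theorem lor1_eq (a b c : Bool) :
    Int.lor 1 (4 * boolToInt a + 2 * boolToInt b + boolToInt c)
      = 4 * boolToInt a + 2 * boolToInt b + 1 := by
  cases a <;> cases b <;> cases c <;> decide

-- B's mask on a cons: A's per-tile suit bit ORed with B's mask on the rest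
theorem alt_fst_cons_man (item : List Int) (rest : List (List Int)) (h : pvFirst item < 9) :
    (classify_hand_suits_alt (item :: rest)).1
      = Int.lor 4 (classify_hand_suits_alt rest).1 := by
  rw [alt_fst, alt_fst, List.map_cons, List.any_cons, List.any_cons, List.any_cons, lor4_eq]
  simp only [decide_eq_true h, decide_eq_false (by omega : ¬ (9:Int) ≤ pvFirst item),
    decide_eq_false (by omega : ¬ (18:Int) ≤ pvFirst item), Bool.true_or, Bool.false_and,
    Bool.false_or, boolToInt]
  norm_num

theorem alt_fst_cons_pin (item : List Int) (rest : List (List Int))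
    (h1 : 9 ≤ pvFirst item) (h2 : pvFirst item < 18) :
    (classify_hand_suits_alt (item :: rest)).1
      = Int.lor 2 (classify_hand_suits_alt rest).1 := by
  rw [alt_fst, alt_fst, List.map_cons, List.any_cons, List.any_cons, List.any_cons, lor2_eq]
  simp only [decide_eq_true h1, decide_eq_true h2,
    decide_eq_false (by omega : ¬ pvFirst item < 9),
    decide_eq_false (by omega : ¬ (18:Int) ≤ pvFirst item), Bool.true_and, Bool.true_or,
    Bool.false_and, Bool.false_or, boolToInt]
  norm_num

theorem alt_fst_cons_sou (item : List Int) (rest : List (List Int))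
    (h1 : 18 ≤ pvFirst item) (h2 : pvFirst item < 27) :
    (classify_hand_suits_alt (item :: rest)).1
      = Int.lor 1 (classify_hand_suits_alt rest).1 := by
  rw [alt_fst, alt_fst, List.map_cons, List.any_cons, List.any_cons, List.any_cons, lor1_eq]
  simp only [decide_eq_true h1, decide_eq_true h2,
    decide_eq_false (by omega : ¬ pvFirst item < 9),
    decide_eq_false (by omega : ¬ pvFirst item < 18), Bool.true_and, Bool.true_or,
    Bool.and_false, Bool.false_or, boolToInt]
  norm_num

theorem alt_fst_cons_honor (item : List Int) (rest : List (List Int)) (h : 27 ≤ pvFirst item) :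
    (classify_hand_suits_alt (item :: rest)).1 = (classify_hand_suits_alt rest).1 := by
  rw [alt_fst, alt_fst, List.map_cons, List.any_cons, List.any_cons, List.any_cons]
  simp only [decide_eq_false (by omega : ¬ pvFirst item < 9),
    decide_eq_false (by omega : ¬ pvFirst item < 18),
    decide_eq_false (by omega : ¬ pvFirst item < 27), Bool.and_false, Bool.false_or]

-- invariant: folding A's step from (m, h) with 0 ≤ m ≤ 7 ORs in B's mask and adds B's honor count
theorem foldl_aStep_eq (hand : List (List Int)) :
    ∀ (m h : Int), 0 ≤ m → m ≤ 7 →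
      hand.foldl aStep (m, h)
        = (Int.lor m (classify_hand_suits_alt hand).1, h + (classify_hand_suits_alt hand).2) := by
  induction hand with
  | nil =>
    intro m h hm0 hm7
    refine Prod.ext ?_ ?_
    · show m = Int.lor m (classify_hand_suits_alt []).1
      rw [alt_fst]
      simp only [List.map_nil, List.any_nil, boolToInt]
      norm_num
      interval_cases m <;> decide
    · show h = h + (classify_hand_suits_alt []).2
      rw [alt_snd]; simp
  | cons item rest ih =>
    intro m h hm0 hm7
    rw [List.foldl_cons]
    have hstep : aStep (m, h) item =
        (if pvFirst item ≥ 27 then (m, h + 1)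
         else if pvFirst item ≥ 18 then (Int.lor m 1, h)
         else if pvFirst item ≥ 9 then (Int.lor m 2, h)
         else (Int.lor m 4, h)) := by
      simp [aStep, pvFirst]
    by_cases h27 : pvFirst item ≥ 27
    · rw [hstep, if_pos h27, ih m (h + 1) hm0 hm7]
      refine Prod.ext ?_ ?_
      · show Int.lor m (classify_hand_suits_alt rest).1
          = Int.lor m (classify_hand_suits_alt (item :: rest)).1
        rw [alt_fst_cons_honor item rest (by omega)]
      · show h + 1 + (classify_hand_suits_alt rest).2 = h + (classify_hand_suits_alt (item :: rest)).2
        rw [alt_snd, alt_snd, List.map_cons, List.filter_cons,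
          if_pos (by simpa using (by omega : (27:Int) ≤ pvFirst item))]
        simp only [List.length_cons]; push_cast; ring
    · have hcount : (classify_hand_suits_alt (item :: rest)).2 = (classify_hand_suits_alt rest).2 := by
        rw [alt_snd, alt_snd, List.map_cons, List.filter_cons,
          if_neg (by simpa using (by omega : ¬ (27:Int) ≤ pvFirst item))]
      obtain ⟨hx0, hx7⟩ := alt_fst_bounds rest
      by_cases h18 : pvFirst item ≥ 18
      · rw [hstep, if_neg h27, if_pos h18]
        obtain ⟨hb0, hb7⟩ := lor_bounds m 1 hm0 hm7 (Or.inl rfl)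
        rw [ih (Int.lor m 1) h hb0 hb7]
        refine Prod.ext ?_ ?_
        · show (Int.lor m 1).lor (classify_hand_suits_alt rest).1
            = Int.lor m (classify_hand_suits_alt (item :: rest)).1
          rw [lor_small m (classify_hand_suits_alt rest).1 1 hm0 hm7 hx0 hx7 (Or.inl rfl),
            alt_fst_cons_sou item rest (by omega) (by omega)]
        · exact (by rw [hcount] : h + (classify_hand_suits_alt rest).2
            = h + (classify_hand_suits_alt (item :: rest)).2)
      · by_cases h9 : pvFirst item ≥ 9
        · rw [hstep, if_neg h27, if_neg h18, if_pos h9]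
          obtain ⟨hb0, hb7⟩ := lor_bounds m 2 hm0 hm7 (Or.inr (Or.inl rfl))
          rw [ih (Int.lor m 2) h hb0 hb7]
          refine Prod.ext ?_ ?_
          · show (Int.lor m 2).lor (classify_hand_suits_alt rest).1
              = Int.lor m (classify_hand_suits_alt (item :: rest)).1
            rw [lor_small m (classify_hand_suits_alt rest).1 2 hm0 hm7 hx0 hx7 (Or.inr (Or.inl rfl)),
              alt_fst_cons_pin item rest (by omega) (by omega)]
          · exact (by rw [hcount] : h + (classify_hand_suits_alt rest).2
              = h + (classify_hand_suits_alt (item :: rest)).2)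
        · rw [hstep, if_neg h27, if_neg h18, if_neg h9]
          obtain ⟨hb0, hb7⟩ := lor_bounds m 4 hm0 hm7 (Or.inr (Or.inr rfl))
          rw [ih (Int.lor m 4) h hb0 hb7]
          refine Prod.ext ?_ ?_
          · show (Int.lor m 4).lor (classify_hand_suits_alt rest).1
              = Int.lor m (classify_hand_suits_alt (item :: rest)).1
            rw [lor_small m (classify_hand_suits_alt rest).1 4 hm0 hm7 hx0 hx7 (Or.inr (Or.inr rfl)),
              alt_fst_cons_man item rest (by omega)]
          · exact (by rw [hcount] : h + (classify_hand_suits_alt rest).2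
              = h + (classify_hand_suits_alt (item :: rest)).2)

-- ===== VERDICT (by name: the statement is the Claim_ definition above) =====
theorem classify_hand_suits_spec : Claim_equal_classify_hand_suits := by
  intro hand _ _
  unfold Spec_classify_hand_suits classify_hand_suits
  rw [foldl_aStep_eq hand 0 0 (by decide) (by decide)]
  obtain ⟨hx0, hx7⟩ := alt_fst_bounds hand
  refine Prod.ext ?_ ?_
  · show Int.lor 0 (classify_hand_suits_alt hand).1 = (classify_hand_suits_alt hand).1
    generalize hgen : (classify_hand_suits_alt hand).1 = x at hx0 hx7 ⊢
    interval_cases x <;> decide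
  · show (0:Int) + (classify_hand_suits_alt hand).2 = (classify_hand_suits_alt hand).2
    ring
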